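-- pv_equiv track=rewrite | github.com/WenzhengZhang/EntQA | utils.py | weak_matching
-- ===== SOURCE A (Python) =====
-- def weak_matching(predictions, gold_entities):
--     number = 0
--     for p in predictions:
--         for g in gold_entities:
--             if (
--                     (set(range(p[1], p[1] + p[2])) & set(
--                         range(g[1], g[1] + g[2])))
--                     and p[3] == g[3]
--                     and p[0] == g[0]
--             ):
--                 number += 1
--
--     return number
-- ===== SOURCE B (Python) =====
-- def weak_matching(predictions, gold_entities):
--     # Index gold mentions once by (doc_id, entity): each bucket keeps (start, end) pairs.
--     by_key = {}
--     for g in gold_entities: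
--         k = (g[0], g[3])
--         by_key[k] = by_key.get(k, []) + [(g[1], g[1] + g[2])]
--     number = 0
--     for p in predictions:
--         s, e = p[1], p[1] + p[2]
--         for gs, ge in by_key.get((p[0], p[3]), []):
--             if max(s, gs) < min(e, ge):
--                 number += 1
--     return number
-- ===== Notes on version B (the rewrite author's own statement) =====
-- stated objective: faster
-- what changed: B indexes the gold mentions once in a dict keyed by (doc_id, entity) and, per prediction, scans only its bucket with a constant-time arithmetic overlap test, instead of A's full P*G double loop that materialises two sets of range indices per pair.
-- outside the precondition, e.g. on weak_matching([(1, 0, 1)], []): A returns 0, B raises IndexError; on weak_matching([], [(1, 0, 1)]): A returns 0, B raises IndexError; on weak_matching([(0, 0, 0, 0)], [(0, 0, 0)]): A returns 0, B raises IndexError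
import Mathlib
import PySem

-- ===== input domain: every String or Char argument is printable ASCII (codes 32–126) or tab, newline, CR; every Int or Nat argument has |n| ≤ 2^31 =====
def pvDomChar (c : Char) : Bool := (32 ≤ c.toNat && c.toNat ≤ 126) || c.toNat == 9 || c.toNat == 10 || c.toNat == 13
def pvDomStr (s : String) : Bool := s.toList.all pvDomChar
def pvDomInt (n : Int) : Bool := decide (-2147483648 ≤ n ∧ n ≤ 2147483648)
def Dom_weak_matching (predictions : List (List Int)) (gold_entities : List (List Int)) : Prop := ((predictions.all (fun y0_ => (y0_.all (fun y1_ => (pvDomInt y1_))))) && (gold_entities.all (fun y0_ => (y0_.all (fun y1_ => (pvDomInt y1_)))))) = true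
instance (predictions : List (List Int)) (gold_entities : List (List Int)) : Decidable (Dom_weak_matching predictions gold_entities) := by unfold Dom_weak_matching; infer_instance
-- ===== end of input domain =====

-- B indexes the gold mentions once in a dict keyed by (doc_id, entity) and checks overlap arithmetically
-- per bucket entry, replacing A's full double loop with per-pair range-set intersections (faster).


-- ===== PORT A =====
def weak_matching (predictions : List (List Int)) (gold_entities : List (List Int)) : Int :=
  predictions.foldl (fun number p =>
    gold_entities.foldl (fun number g =>
      if (PySem.Set.inter
            (PySem.Set.ofList (PySem.List.pyRange (PySem.List.pyGetD p 1 0)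
              (PySem.List.pyGetD p 1 0 + PySem.List.pyGetD p 2 0) 1))
            (PySem.Set.ofList (PySem.List.pyRange (PySem.List.pyGetD g 1 0)
              (PySem.List.pyGetD g 1 0 + PySem.List.pyGetD g 2 0) 1)) ≠ []
          ∧ PySem.List.pyGetD p 3 0 = PySem.List.pyGetD g 3 0
          ∧ PySem.List.pyGetD p 0 0 = PySem.List.pyGetD g 0 0)
      then number + 1 else number) number) 0

-- ===== PORT B =====
def weak_matching_alt (predictions : List (List Int)) (gold_entities : List (List Int)) : Int :=
  let byKey : PySem.Dict (Int × Int) (List (Int × Int)) :=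
    gold_entities.foldl (fun d g =>
      d.modify (PySem.List.pyGetD g 0 0, PySem.List.pyGetD g 3 0) []
        (· ++ [(PySem.List.pyGetD g 1 0, PySem.List.pyGetD g 1 0 + PySem.List.pyGetD g 2 0)]))
      PySem.Dict.empty
  predictions.foldl (fun number p =>
    (byKey.getD (PySem.List.pyGetD p 0 0, PySem.List.pyGetD p 3 0) []).foldl
      (fun n gi =>
        if max (PySem.List.pyGetD p 1 0) gi.1
             < min (PySem.List.pyGetD p 1 0 + PySem.List.pyGetD p 2 0) gi.2
        then n + 1 else n) number) 0

-- ===== PRECONDITION & SPEC =====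
-- Pre_ excludes inputs containing a row of fewer than 4 ints: Python A raises IndexError on them except
-- when short-circuiting (empty other list, or an empty/disjoint range reached first) lets it return 0,
-- and B, which indexes every row of both lists eagerly, raises IndexError there.
def Pre_weak_matching (predictions : List (List Int)) (gold_entities : List (List Int)) : Prop :=
  (∀ p ∈ predictions, 4 ≤ p.length) ∧ (∀ g ∈ gold_entities, 4 ≤ g.length)
instance (predictions : List (List Int)) (gold_entities : List (List Int)) : Decidable (Pre_weak_matching predictions gold_entities) := by unfold Pre_weak_matching; infer_instance

def pvWitness_weak_matching : List (List Int) × List (List Int) :=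
  ([[0, 1, 3, 7]], [[0, 2, 2, 7], [1, 2, 2, 7]])

def Spec_weak_matching (predictions : List (List Int)) (gold_entities : List (List Int)) (out : Int) : Prop := out = weak_matching_alt predictions gold_entities
instance (predictions : List (List Int)) (gold_entities : List (List Int)) (out : Int) : Decidable (Spec_weak_matching predictions gold_entities out) := by unfold Spec_weak_matching; infer_instance

-- ===== CLAIM (what is proved, stated in full; the proofs are below) =====
def Claim_equal_weak_matching : Prop := ∀ (predictions : List (List Int)) (gold_entities : List (List Int)), Dom_weak_matching predictions gold_entities → Pre_weak_matching predictions gold_entities → Spec_weak_matching predictions gold_entities (weak_matching predictions gold_entities)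

-- ===== LEMMAS AND PROOFS =====

-- Nonempty intersection of two integer ranges is the arithmetic overlap test.
lemma range_inter_ne_nil_iff (a b c d : Int) :
    PySem.Set.inter (PySem.Set.ofList (PySem.List.pyRange a b 1))
      (PySem.Set.ofList (PySem.List.pyRange c d 1)) ≠ [] ↔ max a c < min b d := by
  rw [← List.isEmpty_eq_false_iff, List.isEmpty_eq_false_iff_exists_mem]
  constructor
  · rintro ⟨x, hx⟩
    rw [PySem.Set.mem_inter, PySem.Set.mem_ofList, PySem.Set.mem_ofList,
        PySem.List.mem_pyRange_one, PySem.List.mem_pyRange_one] at hx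
    omega
  · intro h
    exact ⟨max a c, by
      rw [PySem.Set.mem_inter, PySem.Set.mem_ofList, PySem.Set.mem_ofList,
          PySem.List.mem_pyRange_one, PySem.List.mem_pyRange_one]
      omega⟩

-- B's bucket for a key is exactly the matching gold rows, projected to (start, end).
lemma bucket_eq (gs : List (List Int)) (k : Int × Int) :
    (gs.foldl (fun d g =>
        d.modify (PySem.List.pyGetD g 0 0, PySem.List.pyGetD g 3 0) []
          (· ++ [(PySem.List.pyGetD g 1 0, PySem.List.pyGetD g 1 0 + PySem.List.pyGetD g 2 0)]))
      PySem.Dict.empty).getD k []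
    = ((gs.filter (fun g =>
          (PySem.List.pyGetD g 0 0, PySem.List.pyGetD g 3 0) == k)).map
        (fun g => (PySem.List.pyGetD g 1 0, PySem.List.pyGetD g 1 0 + PySem.List.pyGetD g 2 0))) := by
  have h := PySem.Dict.getD_foldl_modify_append
    (l := gs.map (fun g => ((PySem.List.pyGetD g 0 0, PySem.List.pyGetD g 3 0),
        (PySem.List.pyGetD g 1 0, PySem.List.pyGetD g 1 0 + PySem.List.pyGetD g 2 0))))
    (d := (PySem.Dict.empty : PySem.Dict (Int × Int) (List (Int × Int)))) (c := k)
  rw [List.foldl_map] at h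
  simpa [List.filter_map, List.map_map, Function.comp_def] using h

-- One prediction against all gold: A's inner loop equals B's bucket loop.
lemma inner_eq (gs : List (List Int)) (p : List Int) (number : Int) :
    gs.foldl (fun number g =>
      if (PySem.Set.inter
            (PySem.Set.ofList (PySem.List.pyRange (PySem.List.pyGetD p 1 0)
              (PySem.List.pyGetD p 1 0 + PySem.List.pyGetD p 2 0) 1))
            (PySem.Set.ofList (PySem.List.pyRange (PySem.List.pyGetD g 1 0)
              (PySem.List.pyGetD g 1 0 + PySem.List.pyGetD g 2 0) 1)) ≠ []
          ∧ PySem.List.pyGetD p 3 0 = PySem.List.pyGetD g 3 0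
          ∧ PySem.List.pyGetD p 0 0 = PySem.List.pyGetD g 0 0)
      then number + 1 else number) number
    = ((gs.foldl (fun d g =>
          d.modify (PySem.List.pyGetD g 0 0, PySem.List.pyGetD g 3 0) []
            (· ++ [(PySem.List.pyGetD g 1 0, PySem.List.pyGetD g 1 0 + PySem.List.pyGetD g 2 0)]))
        PySem.Dict.empty).getD (PySem.List.pyGetD p 0 0, PySem.List.pyGetD p 3 0) []).foldl
        (fun n gi =>
          if max (PySem.List.pyGetD p 1 0) gi.1
               < min (PySem.List.pyGetD p 1 0 + PySem.List.pyGetD p 2 0) gi.2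
          then n + 1 else n) number := by
  rw [bucket_eq, PySem.List.foldl_ite_add_one, PySem.List.foldl_ite_add_one,
      List.countP_map, List.countP_filter]
  congr 1
  congr 1
  apply List.countP_congr
  intro g _
  simp only [Function.comp_def, range_inter_ne_nil_iff]
  by_cases h1 : max (PySem.List.pyGetD p 1 0) (PySem.List.pyGetD g 1 0)
      < min (PySem.List.pyGetD p 1 0 + PySem.List.pyGetD p 2 0)
          (PySem.List.pyGetD g 1 0 + PySem.List.pyGetD g 2 0) <;>
    by_cases h2 : PySem.List.pyGetD p 3 0 = PySem.List.pyGetD g 3 0 <;>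
    by_cases h3 : PySem.List.pyGetD p 0 0 = PySem.List.pyGetD g 0 0 <;>
    simp [h1, h2, h3, Prod.ext_iff] <;> omega

-- ===== VERDICT (by name: the statement is the Claim_ definition above) =====
theorem weak_matching_spec : Claim_equal_weak_matching := by
  intro predictions gold_entities _hdom _hpre
  unfold Spec_weak_matching weak_matching weak_matching_alt
  apply PySem.List.foldl_congr_mem
  intro number p _
  exact inner_eq gold_entities p number
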